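-- pv_equiv track=rewrite | github.com/TUFLOW-Support/QGIS-TUFLOW-Plugin | tuflow/ReFH2/engine.py | getModelIndexes
-- ===== SOURCE A (Python) =====
-- def getModelIndexes(model, header):
--     """
--     Returns index of relevant headers for model type.
--
--     Example:
--         model = "rainfall"
--         return indexes for headers - "net rain" and "design rain"
--
--     """
--
--     indexes = []
--     for i, h in enumerate(header):
--         if model == "rainfall":
--             if 'net rain' in h.lower():
--                 indexes.append(i)
--             elif 'design rain' in h.lower():
--                 indexes.append(i)
--         elif model == "hydrograph":
--             if 'direct runoff' in h.lower():
--                 indexes.append(i)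
--             elif 'baseflow' in h.lower():
--                 indexes.append(i)
--             elif 'total flow' in h.lower():
--                 indexes.append(i)
--
--     return indexes
-- ===== SOURCE B (Python) =====
-- MODEL_KEYWORDS = {
--     "rainfall": ["net rain", "design rain"],
--     "hydrograph": ["direct runoff", "baseflow", "total flow"],
-- }
--
--
-- def getModelIndexes(model, header):
--     # Staged passes: one full scan of the headers PER KEYWORD, collecting the
--     # matching positions of each pass into one set, then sort the union.
--     # Correct because A appends each index at most once (elif) in increasing
--     # order, so A's result is exactly the sorted set of indexes matching any
--     # keyword of the model (empty for unknown models).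
--     matched = set()
--     for kw in MODEL_KEYWORDS.get(model, []):
--         matched.update(i for i, h in enumerate(header) if kw in h.lower())
--     return sorted(matched)
-- ===== Notes on version B (the rewrite author's own statement) =====
-- stated objective: alternative
-- what changed: Swapped the loop nesting: instead of A's single pass over headers with a per-element model if/elif keyword cascade, B makes one full scan of the headers per keyword of a data-driven table, unions the matched positions into a set, and returns the sorted union.
import Mathlib
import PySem

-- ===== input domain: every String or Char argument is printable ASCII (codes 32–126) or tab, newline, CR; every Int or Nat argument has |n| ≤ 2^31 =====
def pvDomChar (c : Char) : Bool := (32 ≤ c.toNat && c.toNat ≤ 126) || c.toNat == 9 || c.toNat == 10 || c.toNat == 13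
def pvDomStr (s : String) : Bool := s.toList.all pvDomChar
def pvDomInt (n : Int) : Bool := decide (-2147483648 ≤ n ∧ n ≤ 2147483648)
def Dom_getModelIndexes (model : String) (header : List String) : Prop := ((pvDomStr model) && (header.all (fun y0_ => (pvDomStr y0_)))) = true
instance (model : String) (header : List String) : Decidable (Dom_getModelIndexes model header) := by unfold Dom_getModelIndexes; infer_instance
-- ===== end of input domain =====

-- B swaps the loop nesting: one scan of the headers per table keyword, set-union of the
-- matched positions, sorted at the end (objective: alternative decomposition, same cost).


-- ===== PORT A =====
def getModelIndexes (model : String) (header : List String) : List Int :=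
  (PySem.List.enumerate header).foldl (fun indexes p =>
    if model == "rainfall" then
      if PySem.Str.isIn "net rain" (PySem.Str.lower p.2) then indexes ++ [p.1]
      else if PySem.Str.isIn "design rain" (PySem.Str.lower p.2) then indexes ++ [p.1]
      else indexes
    else if model == "hydrograph" then
      if PySem.Str.isIn "direct runoff" (PySem.Str.lower p.2) then indexes ++ [p.1]
      else if PySem.Str.isIn "baseflow" (PySem.Str.lower p.2) then indexes ++ [p.1]
      else if PySem.Str.isIn "total flow" (PySem.Str.lower p.2) then indexes ++ [p.1]
      else indexes
    else indexes) []

-- ===== PORT B =====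
def modelKeywords : PySem.Dict String (List String) :=
  PySem.Dict.ofList [("rainfall", ["net rain", "design rain"]),
                     ("hydrograph", ["direct runoff", "baseflow", "total flow"])]

-- matched.update(i for i, h in enumerate(header) if kw in h.lower())
def kwPass (header : List String) (kw : String) : List Int :=
  ((PySem.List.enumerate header).filter
      (fun p => PySem.Str.isIn kw (PySem.Str.lower p.2))).map (fun p => p.1)

def getModelIndexes_alt (model : String) (header : List String) : List Int :=
  let matched : PySem.Set Int :=
    (modelKeywords.getD model []).foldl
      (fun s kw => PySem.Set.update s (kwPass header kw)) PySem.Set.empty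
  PySem.List.sorted matched (fun x => x) false

-- ===== PRECONDITION & SPEC =====
def Spec_getModelIndexes (model : String) (header : List String) (out : List Int) : Prop := out = getModelIndexes_alt model header
instance (model : String) (header : List String) (out : List Int) : Decidable (Spec_getModelIndexes model header out) := by unfold Spec_getModelIndexes; infer_instance

-- ===== CLAIM (what is proved, stated in full; the proofs are below) =====
def Claim_equal_getModelIndexes : Prop := ∀ (model : String) (header : List String), Dom_getModelIndexes model header → Spec_getModelIndexes model header (getModelIndexes model header)

-- ===== LEMMAS AND PROOFS =====

theorem kw_rain : modelKeywords.getD "rainfall" [] = ["net rain", "design rain"] := by decide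

theorem kw_hyd : modelKeywords.getD "hydrograph" [] = ["direct runoff", "baseflow", "total flow"] := by decide

theorem kw_other (model : String) (h1 : model ≠ "rainfall") (h2 : model ≠ "hydrograph") :
    modelKeywords.getD model [] = [] := by
  have hitems : modelKeywords.items = [("rainfall", ["net rain", "design rain"]),
      ("hydrograph", ["direct runoff", "baseflow", "total flow"])] := by decide
  have hb1 : ("rainfall" == model) = false := by simp [Ne.symm h1]
  have hb2 : ("hydrograph" == model) = false := by simp [Ne.symm h2]
  simp [PySem.Dict.getD, PySem.Dict.get?, hitems, List.find?, hb1, hb2]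

-- collapse an elif cascade that appends the same element into one boolean-or test
theorem if_elif_append {α : Type} (a b : Bool) (acc out : List α) (x : α) :
    (if a then acc ++ [x] else if b then acc ++ [x] else out)
      = (if a || b then acc ++ [x] else out) := by
  cases a <;> cases b <;> simp

theorem if_elif3_append {α : Type} (a b c : Bool) (acc : List α) (x : α) :
    (if a then acc ++ [x] else if b then acc ++ [x] else if c then acc ++ [x] else acc)
      = (if a || b || c then acc ++ [x] else acc) := by
  cases a <;> cases b <;> cases c <;> simp

-- the canonical "filter the enumerated headers by the disjunction of the keywords" list
def anyPass (header : List String) (kws : List String) : List Int :=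
  ((PySem.List.enumerate header).filter
      (fun p => kws.any (fun kw => PySem.Str.isIn kw (PySem.Str.lower p.2)))).map (fun p => p.1)

theorem mem_fold_update (header : List String) (kws : List String) (s : PySem.Set Int) (i : Int) :
    i ∈ kws.foldl (fun s kw => PySem.Set.update s (kwPass header kw)) s
      ↔ i ∈ s ∨ ∃ kw ∈ kws, i ∈ kwPass header kw := by
  induction kws generalizing s with
  | nil => simp
  | cons k t ih =>
    simp only [List.foldl_cons]
    rw [ih (PySem.Set.update s (kwPass header k))]
    simp only [PySem.Set.mem_update, List.mem_cons]
    constructor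
    · rintro ((h | h) | ⟨kw, hkw, h⟩)
      · exact Or.inl h
      · exact Or.inr ⟨k, Or.inl rfl, h⟩
      · exact Or.inr ⟨kw, Or.inr hkw, h⟩
    · rintro (h | ⟨kw, (rfl | hkw), h⟩)
      · exact Or.inl (Or.inl h)
      · exact Or.inl (Or.inr h)
      · exact Or.inr ⟨kw, hkw, h⟩

theorem nodup_fold_update (header : List String) (kws : List String) (s : PySem.Set Int)
    (hs : s.Nodup) :
    (kws.foldl (fun s kw => PySem.Set.update s (kwPass header kw)) s).Nodup := by
  induction kws generalizing s with
  | nil => exact hs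
  | cons k t ih => exact ih _ (PySem.Set.nodup_update s _ hs)

theorem pairwise_anyPass (header : List String) (kws : List String) :
    (anyPass header kws).Pairwise (· < ·) := by
  unfold anyPass
  exact List.pairwise_map.mpr
    ((PySem.List.pairwise_lt_enumerate header 0).filter _)

theorem alt_eq_anyPass (header : List String) (kws : List String) :
    PySem.List.sorted
        (kws.foldl (fun s kw => PySem.Set.update s (kwPass header kw)) PySem.Set.empty)
        (fun x => x) false
      = anyPass header kws := by
  apply PySem.List.sorted_eq_of_perm_of_pairwise_lt
  · -- (anyPass header kws).Perm (fold of updates)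
    apply (List.perm_ext_iff_of_nodup
        (((pairwise_anyPass header kws).imp ne_of_lt : List.Nodup _))
        (nodup_fold_update header kws _ List.nodup_nil)).mpr
    intro i
    rw [mem_fold_update]
    unfold anyPass kwPass
    simp only [List.mem_map, List.mem_filter, List.any_eq_true]
    constructor
    · rintro ⟨p, ⟨hp, kw, hkw, hin⟩, rfl⟩
      exact Or.inr ⟨kw, hkw, p, ⟨hp, hin⟩, rfl⟩
    · rintro (h | ⟨kw, hkw, p, ⟨hp, hin⟩, rfl⟩)
      · simp at h
      · exact ⟨p, ⟨hp, kw, hkw, hin⟩, rfl⟩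
  · exact pairwise_anyPass header kws

-- ===== VERDICT (by name: the statement is the Claim_ definition above) =====
theorem getModelIndexes_spec : Claim_equal_getModelIndexes := by
  intro model header _
  unfold Spec_getModelIndexes getModelIndexes getModelIndexes_alt
  by_cases hr : model = "rainfall"
  · subst hr
    rw [kw_rain, alt_eq_anyPass]
    simp only [beq_self_eq_true, if_true]
    rw [show (fun (indexes : List Int) (p : Int × String) =>
        if PySem.Str.isIn "net rain" (PySem.Str.lower p.2) then indexes ++ [p.1]
        else if PySem.Str.isIn "design rain" (PySem.Str.lower p.2) then indexes ++ [p.1]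
        else indexes) = (fun indexes p =>
        if (PySem.Str.isIn "net rain" (PySem.Str.lower p.2)
          || PySem.Str.isIn "design rain" (PySem.Str.lower p.2)) then indexes ++ [p.1]
        else indexes) from funext fun acc => funext fun p => if_elif_append _ _ _ _ _,
      PySem.List.foldl_append_if]
    unfold anyPass
    simp
  · by_cases hh : model = "hydrograph"
    · subst hh
      rw [kw_hyd, alt_eq_anyPass]
      simp only [show ("hydrograph" == "rainfall") = false from rfl, Bool.false_eq_true,
        if_false, beq_self_eq_true, if_true]
      rw [show (fun (indexes : List Int) (p : Int × String) =>
          if PySem.Str.isIn "direct runoff" (PySem.Str.lower p.2) then indexes ++ [p.1]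
          else if PySem.Str.isIn "baseflow" (PySem.Str.lower p.2) then indexes ++ [p.1]
          else if PySem.Str.isIn "total flow" (PySem.Str.lower p.2) then indexes ++ [p.1]
          else indexes) = (fun indexes p =>
          if (PySem.Str.isIn "direct runoff" (PySem.Str.lower p.2)
            || PySem.Str.isIn "baseflow" (PySem.Str.lower p.2)
            || PySem.Str.isIn "total flow" (PySem.Str.lower p.2)) then indexes ++ [p.1]
          else indexes) from funext fun acc => funext fun p => if_elif3_append _ _ _ _ _,
        PySem.List.foldl_append_if]
      unfold anyPass
      simp [Bool.or_assoc]
    · have h1 : (model == "rainfall") = false := by simp [hr]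
      have h2 : (model == "hydrograph") = false := by simp [hh]
      rw [kw_other model hr hh]
      simp only [h1, h2, Bool.false_eq_true, if_false, List.foldl_fixed, List.foldl_nil]
      decide
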